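-- pv_equiv track=rewrite | github.com/kotuwe/Tasks | task_09.py | connect_dicts
-- ===== SOURCE A (Python) =====
-- def connect_dicts(dict1, dict2):
--     if sum(dict2.values()) >= sum(dict1.values()):
--         dict3 = dict1 | dict2
--     else:
--         dict3 = dict2 | dict1
--
--     for key, value in list(dict3.items()):
--         if value < 10:
--             del dict3[key]
--
--     sorted_values = sorted(dict3.values())
--     new_sorted_dictionary = {}
--     for i in sorted_values:
--         for k in dict3.keys():
--             if dict3[k] == i:
--                 new_sorted_dictionary[k] = dict3[k]
--                 break
--     return new_sorted_dictionary
-- ===== SOURCE B (Python) =====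
-- def connect_dicts(dict1, dict2):
--     if sum(dict2.values()) >= sum(dict1.values()):
--         merged = dict1 | dict2
--     else:
--         merged = dict2 | dict1
--     # one pass: map each surviving value to the first key holding it
--     first = {}
--     for k, v in merged.items():
--         if v >= 10 and v not in first:
--             first[v] = k
--     return {first[v]: v for v in sorted(first)}
-- ===== Notes on version B (the rewrite author's own statement) =====
-- stated objective: alternative
-- what changed: Replaces A's delete-loop plus per-sorted-value nested scan over all keys by one pass that builds an inverse dict (value -> first key holding it) and a single sort of its distinct keys.
import Mathlib
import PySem

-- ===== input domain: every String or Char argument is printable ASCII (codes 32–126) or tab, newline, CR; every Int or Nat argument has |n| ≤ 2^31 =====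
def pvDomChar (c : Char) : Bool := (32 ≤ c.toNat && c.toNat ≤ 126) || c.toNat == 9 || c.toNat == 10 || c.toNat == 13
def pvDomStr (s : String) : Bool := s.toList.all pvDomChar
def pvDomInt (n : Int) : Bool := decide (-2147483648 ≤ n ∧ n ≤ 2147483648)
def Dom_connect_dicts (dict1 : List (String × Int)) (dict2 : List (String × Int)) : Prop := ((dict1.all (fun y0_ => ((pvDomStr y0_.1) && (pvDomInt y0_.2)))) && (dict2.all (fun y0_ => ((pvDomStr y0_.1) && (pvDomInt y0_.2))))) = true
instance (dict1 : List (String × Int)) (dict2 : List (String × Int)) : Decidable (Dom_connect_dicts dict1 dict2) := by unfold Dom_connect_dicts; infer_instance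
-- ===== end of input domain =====

-- B replaces A's sorted-values-with-duplicates outer loop and its nested first-key scan by one
-- pass building an inverse dict (value -> first key) and a single sort of its distinct keys.

-- ===== PORT A =====
-- inner loop 'for k in dict3.keys(): if dict3[k] == i: new[k] = dict3[k]; break'
-- (dict3[k] is ported as getD k 0; exact here because k is drawn from dict3.keys())
def pvInnerScan (d : PySem.Dict String Int) (i : Int) (nd : PySem.Dict String Int) :
    List String → PySem.Dict String Int
  | [] => nd
  | k :: ks => if d.getD k 0 = i then nd.insert k (d.getD k 0) else pvInnerScan d i nd ks

def connect_dicts (dict1 : List (String × Int)) (dict2 : List (String × Int)) : List (String × Int) :=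
  let d1 := PySem.Dict.ofList dict1
  let d2 := PySem.Dict.ofList dict2
  let dict3 := if d2.values.sum ≥ d1.values.sum then d1.update d2.items else d2.update d1.items
  let dict3' := dict3.items.foldl (fun d p => if p.2 < 10 then d.erase p.1 else d) dict3
  let sorted_values := PySem.List.sorted dict3'.values (fun v => v) false
  (sorted_values.foldl (fun nd i => pvInnerScan dict3' i nd dict3'.keys) PySem.Dict.empty).items

-- ===== PORT B =====
def connect_dicts_alt (dict1 : List (String × Int)) (dict2 : List (String × Int)) : List (String × Int) :=
  let d1 := PySem.Dict.ofList dict1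
  let d2 := PySem.Dict.ofList dict2
  let merged := if d2.values.sum ≥ d1.values.sum then d1.update d2.items else d2.update d1.items
  let first := merged.items.foldl
    (fun f p => if 10 ≤ p.2 ∧ f.contains p.2 = false then f.insert p.2 p.1 else f)
    (PySem.Dict.empty : PySem.Dict Int String)
  -- {first[v]: v for v in sorted(first)}  (first[v] ported as getD v ""; exact: v ranges over first's keys)
  ((PySem.List.sorted first.keys (fun v => v) false).foldl
    (fun o v => o.insert (first.getD v "") v) (PySem.Dict.empty : PySem.Dict String Int)).items

-- ===== PRECONDITION & SPEC =====
def Spec_connect_dicts (dict1 : List (String × Int)) (dict2 : List (String × Int)) (out : List (String × Int)) : Prop := out = connect_dicts_alt dict1 dict2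
instance (dict1 : List (String × Int)) (dict2 : List (String × Int)) (out : List (String × Int)) : Decidable (Spec_connect_dicts dict1 dict2 out) := by unfold Spec_connect_dicts; infer_instance

-- ===== CLAIM (what is proved, stated in full; the proofs are below) =====
def Claim_equal_connect_dicts : Prop := ∀ (dict1 : List (String × Int)) (dict2 : List (String × Int)), Dom_connect_dicts dict1 dict2 → Spec_connect_dicts dict1 dict2 (connect_dicts dict1 dict2)

-- ===== LEMMAS AND PROOFS =====

-- first key of I holding value i (as the full pair)
def pvPf (I : List (String × Int)) (i : Int) : String × Int :=
  (I.find? (fun p => p.2 == i)).getD ("", 0)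

lemma pv_fold_erase (l : List (String × Int)) : ∀ (d : PySem.Dict String Int),
    (l.foldl (fun a p => if p.2 < 10 then a.erase p.1 else a) d).items
      = d.items.filter (fun q => !(l.any (fun p => decide (p.2 < 10) && (p.1 == q.1)))) := by
  induction l with
  | nil => intro d; simp
  | cons p l ih =>
    intro d
    by_cases hp : p.2 < 10
    · rw [List.foldl_cons, ih, if_pos hp]
      simp only [PySem.Dict.erase, List.filter_filter]
      apply List.filter_congr; intro q _
      have hsymm : (p.1 == q.1) = (q.1 == p.1) := by
        by_cases h : p.1 = q.1
        · simp [h]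
        · simp [h, Ne.symm h]
      simp [List.any_cons, hp, Bool.not_or, Bool.and_comm, hsymm]
    · rw [List.foldl_cons, ih, if_neg hp]
      apply List.filter_congr; intro q _
      simp [List.any_cons, hp]

lemma pv_pair_unique {I : List (String × Int)} (hnd : (I.map Prod.fst).Nodup)
    {p q : String × Int} (hp : p ∈ I) (hq : q ∈ I) (hk : p.1 = q.1) : p = q :=
  List.inj_on_of_nodup_map hnd hp hq hk

lemma pv_d4_items (M : PySem.Dict String Int) (hnd : M.keys.Nodup) :
    (M.items.foldl (fun a p => if p.2 < 10 then a.erase p.1 else a) M).items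
      = M.items.filter (fun q => decide (10 ≤ q.2)) := by
  rw [pv_fold_erase]
  apply List.filter_congr
  intro q hq
  have hnd' : (M.items.map Prod.fst).Nodup := hnd
  by_cases h2 : q.2 < 10
  · have : M.items.any (fun p => decide (p.2 < 10) && (p.1 == q.1)) = true := by
      rw [List.any_eq_true]
      exact ⟨q, hq, by simp [h2]⟩
    simp [this]; omega
  · have : M.items.any (fun p => decide (p.2 < 10) && (p.1 == q.1)) = false := by
      rw [List.any_eq_false]
      rintro p hp
      by_cases hk : (p.1 == q.1) = true
      · have := pv_pair_unique hnd' hp hq (eq_of_beq hk)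
        subst this
        simp [h2]
      · simp [hk]
    simp [this]; omega

lemma pv_innerScan_eq (d nd : PySem.Dict String Int) (i : Int) :
    ∀ (l : List (String × Int)), (∀ p ∈ l, d.getD p.1 0 = p.2) →
      pvInnerScan d i nd (l.map Prod.fst) =
        match l.find? (fun p => p.2 == i) with
        | some p => nd.insert p.1 p.2
        | none => nd := by
  intro l
  induction l with
  | nil => intro _; rfl
  | cons p l ih =>
    intro h
    have hp : d.getD p.1 0 = p.2 := h p (by simp)
    simp only [List.map_cons, pvInnerScan, List.find?_cons]
    by_cases hi : p.2 = i
    · rw [if_pos (by rw [hp, hi]), hp]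
      simp [hi]
    · rw [if_neg (by rw [hp]; exact hi)]
      have : (p.2 == i) = false := by simp [hi]
      rw [this]
      exact ih (fun q hq => h q (by simp [hq]))

lemma pv_pf_spec {I : List (String × Int)} {i : Int} (hi : i ∈ I.map Prod.snd) :
    I.find? (fun p => p.2 == i) = some (pvPf I i) ∧ pvPf I i ∈ I ∧ (pvPf I i).2 = i := by
  obtain ⟨p, hp, hpe⟩ := List.mem_map.mp hi
  have hsome : (I.find? (fun p => p.2 == i)).isSome := by
    rw [List.find?_isSome]
    exact ⟨p, hp, by simp [hpe]⟩
  obtain ⟨q, hq⟩ := Option.isSome_iff_exists.mp hsome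
  have h1 : pvPf I i = q := by simp [pvPf, hq]
  refine ⟨by rw [hq, h1], ?_, ?_⟩
  · rw [h1]; exact List.mem_of_find?_eq_some hq
  · rw [h1]; have := List.find?_some hq
    exact eq_of_beq this

lemma pv_pf_inj {I : List (String × Int)} (hnd : (I.map Prod.fst).Nodup) {i j : Int}
    (hi : i ∈ I.map Prod.snd) (hj : j ∈ I.map Prod.snd)
    (h : (pvPf I i).1 = (pvPf I j).1) : i = j := by
  obtain ⟨-, hmi, hvi⟩ := pv_pf_spec hi
  obtain ⟨-, hmj, hvj⟩ := pv_pf_spec hj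
  rw [← hvi, ← hvj, pv_pair_unique hnd hmi hmj h]

lemma pv_fold_insert (I : List (String × Int)) (hnd : (I.map Prod.fst).Nodup) :
    ∀ (W S : List Int), (∀ i ∈ W, i ∈ I.map Prod.snd) → (∀ j ∈ S, j ∈ I.map Prod.snd) →
      W.foldl (fun nd i => nd.insert (pvPf I i).1 (pvPf I i).2) (PySem.Dict.mk (S.map (pvPf I)))
        = PySem.Dict.mk ((W.foldl PySem.Set.add S).map (pvPf I)) := by
  intro W
  induction W with
  | nil => intro S _ _; rfl
  | cons i W ih =>
    intro S hW hS
    have hiI : i ∈ I.map Prod.snd := hW i (by simp)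
    rw [List.foldl_cons, List.foldl_cons]
    by_cases hiS : i ∈ S
    · have hcon : (PySem.Dict.mk (S.map (pvPf I))).contains (pvPf I i).1 = true := by
        rw [PySem.Dict.contains_mk, List.any_eq_true]
        exact ⟨pvPf I i, List.mem_map_of_mem hiS, by simp⟩
      have hins : (PySem.Dict.mk (S.map (pvPf I))).insert (pvPf I i).1 (pvPf I i).2
          = PySem.Dict.mk (S.map (pvPf I)) := by
        apply PySem.Dict.ext
        rw [PySem.Dict.items_insert_of_contains _ _ hcon]
        show List.map _ (S.map (pvPf I)) = S.map (pvPf I)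
        rw [List.map_map]
        apply List.map_congr_left
        intro j hjS
        by_cases hk : ((pvPf I j).1 == (pvPf I i).1) = true
        · have : j = i := pv_pf_inj hnd (hS j hjS) hiI (eq_of_beq hk)
          subst this
          simp [Function.comp]
        · simp [Function.comp, hk]
      have hadd : PySem.Set.add S i = S := by
        simp [PySem.Set.add, PySem.Set.contains]
        exact hiS
      rw [hins, hadd]
      exact ih S (fun j hj => hW j (List.mem_cons_of_mem _ hj)) hS
    · have hcon : (PySem.Dict.mk (S.map (pvPf I))).contains (pvPf I i).1 = false := by
        rw [PySem.Dict.contains_mk, List.any_eq_false]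
        rintro x hx
        obtain ⟨j, hjS, rfl⟩ := List.mem_map.mp hx
        by_cases hk : ((pvPf I j).1 == (pvPf I i).1) = true
        · exact absurd (pv_pf_inj hnd (hS j hjS) hiI (eq_of_beq hk) ▸ hjS) hiS
        · simp [hk]
      have hins : (PySem.Dict.mk (S.map (pvPf I))).insert (pvPf I i).1 (pvPf I i).2
          = PySem.Dict.mk ((S ++ [i]).map (pvPf I)) := by
        apply PySem.Dict.ext
        rw [PySem.Dict.items_insert_of_not_contains _ _ hcon]
        simp
      have hadd : PySem.Set.add S i = S ++ [i] := by
        simp [PySem.Set.add, PySem.Set.contains]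
        intro hmem
        exact absurd hmem hiS
      rw [hins, hadd]
      exact ih (S ++ [i]) (fun j hj => hW j (List.mem_cons_of_mem _ hj)) (by
        intro j hj
        rcases List.mem_append.mp hj with h | h
        · exact hS j h
        · simp at h; subst h; exact hiI)

lemma pv_first_get? (v : Int) :
    ∀ (l : List (String × Int)) (f0 : PySem.Dict Int String),
      ((l.foldl (fun f p => if f.contains p.2 = false then f.insert p.2 p.1 else f) f0).get? v)
        = if f0.contains v = true then f0.get? v
          else (l.find? (fun p => p.2 == v)).map Prod.fst := by
  intro l
  induction l with
  | nil =>
    intro f0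
    by_cases h : f0.contains v = true
    · simp [h]
    · have h0 : f0.get? v = none := (PySem.Dict.get?_eq_none_iff_contains f0 v).mpr (by simpa using h)
      simp [h, h0]
  | cons p l ih =>
    intro f0
    rw [List.foldl_cons]
    by_cases hc : f0.contains p.2 = true
    · rw [if_neg (by simp [hc])]
      rw [ih f0, List.find?_cons]
      by_cases hv : p.2 = v
      · subst hv
        simp [hc]
      · have : (p.2 == v) = false := by simp [hv]
        rw [this]
    · rw [if_pos (by simpa using hc)]
      rw [ih]
      by_cases hv : p.2 = v
      · subst hv
        rw [if_pos (PySem.Dict.contains_insert_self f0 p.2 p.1)]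
        rw [PySem.Dict.get?_insert_self]
        simp [hc]
      · have h1 : (f0.insert p.2 p.1).contains v = f0.contains v := by
          rw [PySem.Dict.contains_insert]
          simp [hv, Ne.symm] -- (v == p.2) = false
        have h2 : (f0.insert p.2 p.1).get? v = f0.get? v :=
          PySem.Dict.get?_insert_of_ne f0 p.1 (fun h => hv h.symm)
        rw [h1, h2, List.find?_cons]
        have : (p.2 == v) = false := by simp [hv]
        rw [this]

lemma pv_first_keys :
    ∀ (l : List (String × Int)) (f0 : PySem.Dict Int String),
      (l.foldl (fun f p => if f.contains p.2 = false then f.insert p.2 p.1 else f) f0).keys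
        = (l.map Prod.snd).foldl PySem.Set.add f0.keys := by
  intro l
  induction l with
  | nil => intro f0; rfl
  | cons p l ih =>
    intro f0
    rw [List.foldl_cons, List.map_cons, List.foldl_cons]
    by_cases hc : f0.contains p.2 = true
    · rw [if_neg (by simp [hc]), ih]
      have : PySem.Set.add f0.keys p.2 = f0.keys := by
        simp [PySem.Set.add, PySem.Set.contains]
        exact (PySem.Dict.contains_iff_mem_keys f0 p.2).mp hc
      rw [this]
    · rw [if_pos (by simpa using hc), ih]
      have : PySem.Set.add f0.keys p.2 = f0.keys ++ [p.2] := by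
        simp [PySem.Set.add, PySem.Set.contains]
        intro hmem
        exact absurd ((PySem.Dict.contains_iff_mem_keys f0 p.2).mpr hmem) (by simp [hc])
      rw [PySem.Dict.keys_insert_of_not_contains _ _ (by simpa using hc), ← this]

lemma pv_foldl_add_disjoint {α : Type} [BEq α] [LawfulBEq α] :
    ∀ (l s : List α), l.Nodup → (∀ x ∈ l, x ∉ s) → l.foldl PySem.Set.add s = s ++ l := by
  intro l
  induction l with
  | nil => intro s _ _; simp
  | cons a l ih =>
    intro s hnd hdis
    rw [List.foldl_cons]
    have ha : PySem.Set.add s a = s ++ [a] := by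
      simp [PySem.Set.add, PySem.Set.contains]
      intro hmem
      exact absurd hmem (hdis a (by simp))
    rw [ha, ih (s ++ [a]) (List.Nodup.of_cons hnd) ?_, List.append_assoc]
    · rfl
    · intro x hx
      rw [List.mem_append]
      rintro (h | h)
      · exact hdis x (List.mem_cons_of_mem _ hx) h
      · simp at h
        subst h
        exact absurd hx ((List.nodup_cons.mp hnd).1)

lemma pv_foldl_add_sublist {α : Type} [BEq α] :
    ∀ (l s : List α), ∃ t, l.foldl PySem.Set.add s = s ++ t ∧ t.Sublist l := by
  intro l
  induction l with
  | nil => intro s; exact ⟨[], by simp⟩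
  | cons a l ih =>
    intro s
    rw [List.foldl_cons]
    by_cases hc : PySem.Set.contains s a = true
    · have : PySem.Set.add s a = s := by unfold PySem.Set.add; rw [if_pos hc]
      rw [this]
      obtain ⟨t, ht, hs⟩ := ih s
      exact ⟨t, ht, hs.cons a⟩
    · have : PySem.Set.add s a = s ++ [a] := by unfold PySem.Set.add; rw [if_neg hc]
      rw [this]
      obtain ⟨t, ht, hs⟩ := ih (s ++ [a])
      exact ⟨a :: t, by rw [ht, List.append_assoc]; rfl, hs.cons₂ a⟩

lemma pv_ofList_of_nodup {α : Type} [BEq α] [LawfulBEq α] (l : List α) (h : l.Nodup) :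
    PySem.Set.ofList l = l := by
  show l.foldl PySem.Set.add PySem.Set.empty = l
  have := pv_foldl_add_disjoint l [] h (by simp)
  simpa using this

lemma pv_set_sorted (W : List Int) :
    PySem.Set.ofList (PySem.List.sorted W (fun v => v) false)
      = PySem.List.sorted (PySem.Set.ofList W) (fun v => v) false := by
  have hL : (PySem.Set.ofList (PySem.List.sorted W (fun v => v) false)).Nodup :=
    PySem.Set.nodup_ofList _
  have hS : (PySem.List.sorted (PySem.Set.ofList W) (fun v => v) false).Nodup :=
    ((PySem.List.sorted_perm _ _ _).nodup_iff).mpr (PySem.Set.nodup_ofList _)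
  have hmem : ∀ a : Int, a ∈ PySem.Set.ofList (PySem.List.sorted W (fun v => v) false)
      ↔ a ∈ PySem.List.sorted (PySem.Set.ofList W) (fun v => v) false := by
    intro a
    rw [PySem.Set.mem_ofList, (PySem.List.sorted_perm W _ _).mem_iff,
      (PySem.List.sorted_perm (PySem.Set.ofList W) _ _).mem_iff, PySem.Set.mem_ofList]
  have hperm := (List.perm_ext_iff_of_nodup hL hS).mpr hmem
  have hpL : (PySem.Set.ofList (PySem.List.sorted W (fun v => v) false)).Pairwise (fun a b : Int => a ≤ b) := by
    obtain ⟨t, ht, hsub⟩ := pv_foldl_add_sublist (PySem.List.sorted W (fun v => v) false) ([] : List Int)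
    have : PySem.Set.ofList (PySem.List.sorted W (fun v => v) false) = t := by
      show (PySem.List.sorted W (fun v => v) false).foldl PySem.Set.add PySem.Set.empty = t
      simpa using ht
    rw [this]
    exact (PySem.List.sorted_pairwise W (fun v => v)).sublist hsub
  have hpS : (PySem.List.sorted (PySem.Set.ofList W) (fun v => v) false).Pairwise (fun a b : Int => a ≤ b) :=
    PySem.List.sorted_pairwise _ _
  exact List.Perm.eq_of_pairwise (fun a b _ _ h1 h2 => le_antisymm h1 h2) hpL hpS hperm

lemma pv_main (M d4 : PySem.Dict String Int) (hnd : M.keys.Nodup)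
    (hI : d4.items = M.items.filter (fun q => decide (10 ≤ q.2))) :
    ((PySem.List.sorted d4.values (fun v => v) false).foldl
        (fun nd i => pvInnerScan d4 i nd d4.keys) PySem.Dict.empty).items
      =
    (let first := M.items.foldl
        (fun f p => if 10 ≤ p.2 ∧ f.contains p.2 = false then f.insert p.2 p.1 else f)
        (PySem.Dict.empty : PySem.Dict Int String)
     ((PySem.List.sorted first.keys (fun v => v) false).foldl
        (fun o v => o.insert (first.getD v "") v) (PySem.Dict.empty : PySem.Dict String Int)).items) := by
  set I : List (String × Int) := M.items.filter (fun q => decide (10 ≤ q.2)) with hIdef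
  have hndM : (M.items.map Prod.fst).Nodup := hnd
  have hndI : (I.map Prod.fst).Nodup :=
    (((List.filter_sublist (l := M.items))).map Prod.fst).nodup hndM
  have hkeys : d4.keys = I.map Prod.fst := by
    show d4.items.map (fun x => x.1) = I.map Prod.fst
    rw [hI]
  have hvals : d4.values = I.map Prod.snd := by
    show d4.items.map (fun x => x.2) = I.map Prod.snd
    rw [hI]
  have hd4nd : d4.keys.Nodup := by rw [hkeys]; exact hndI
  have hgetD : ∀ p ∈ I, d4.getD p.1 0 = p.2 := by
    intro p hp
    exact PySem.Dict.getD_of_mem_items d4 (by rw [hI]; exact hp) hd4nd 0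
  -- A side
  set V : List Int := PySem.List.sorted (I.map Prod.snd) (fun v => v) false with hVdef
  have hVmem : ∀ i ∈ V, i ∈ I.map Prod.snd := fun i hi =>
    (PySem.List.sorted_perm _ _ _).mem_iff.mp hi
  have hA1 : (PySem.List.sorted d4.values (fun v => v) false).foldl
      (fun nd i => pvInnerScan d4 i nd d4.keys) PySem.Dict.empty
      = V.foldl (fun nd i => nd.insert (pvPf I i).1 (pvPf I i).2) PySem.Dict.empty := by
    rw [hvals]
    apply PySem.List.foldl_congr_mem
    intro nd i hi
    rw [hkeys, pv_innerScan_eq d4 nd i I hgetD, (pv_pf_spec (hVmem i hi)).1]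
  have hA2 : V.foldl (fun nd i => nd.insert (pvPf I i).1 (pvPf I i).2) PySem.Dict.empty
      = PySem.Dict.mk ((PySem.Set.ofList V).map (pvPf I)) := by
    have := pv_fold_insert I hndI V [] hVmem (by simp)
    simpa using this
  -- B side
  show _ = (((PySem.List.sorted (M.items.foldl
        (fun f p => if 10 ≤ p.2 ∧ f.contains p.2 = false then f.insert p.2 p.1 else f)
        (PySem.Dict.empty : PySem.Dict Int String)).keys (fun v => v) false).foldl
        (fun o v => o.insert ((M.items.foldl
        (fun f p => if 10 ≤ p.2 ∧ f.contains p.2 = false then f.insert p.2 p.1 else f)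
        (PySem.Dict.empty : PySem.Dict Int String)).getD v "") v) (PySem.Dict.empty : PySem.Dict String Int)).items)
  have hfun : (fun (f : PySem.Dict Int String) (p : String × Int) =>
        if 10 ≤ p.2 ∧ f.contains p.2 = false then f.insert p.2 p.1 else f)
      = fun f p => if 10 ≤ p.2 then (if f.contains p.2 = false then f.insert p.2 p.1 else f) else f := by
    funext f p
    by_cases h1 : 10 ≤ p.2 <;> by_cases h2 : f.contains p.2 = false <;> simp [h1, h2]
  have hfirst : M.items.foldl
      (fun f p => if 10 ≤ p.2 ∧ f.contains p.2 = false then f.insert p.2 p.1 else f)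
      (PySem.Dict.empty : PySem.Dict Int String)
      = I.foldl (fun f p => if f.contains p.2 = false then f.insert p.2 p.1 else f)
        (PySem.Dict.empty : PySem.Dict Int String) := by
    rw [hfun, PySem.List.foldl_ite_eq_foldl_filter (fun p : String × Int => 10 ≤ p.2)]
  rw [hfirst]
  set first : PySem.Dict Int String :=
    I.foldl (fun f p => if f.contains p.2 = false then f.insert p.2 p.1 else f)
      (PySem.Dict.empty : PySem.Dict Int String) with hfdef
  have hfk : first.keys = PySem.Set.ofList (I.map Prod.snd) := by
    rw [hfdef, pv_first_keys]
    rfl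
  set S : List Int := PySem.List.sorted first.keys (fun v => v) false with hSdef
  have hSmem : ∀ v ∈ S, v ∈ I.map Prod.snd := by
    intro v hv
    have := (PySem.List.sorted_perm _ _ _).mem_iff.mp hv
    rw [hfk] at this
    exact (PySem.Set.mem_ofList _ _).mp this
  have hB1 : S.foldl (fun o v => o.insert (first.getD v "") v) PySem.Dict.empty
      = S.foldl (fun nd i => nd.insert (pvPf I i).1 (pvPf I i).2) PySem.Dict.empty := by
    apply PySem.List.foldl_congr_mem
    intro o v hv
    have hvI := hSmem v hv
    have hget : first.get? v = some (pvPf I v).1 := by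
      rw [hfdef, pv_first_get?]
      rw [if_neg (by simp)]
      rw [(pv_pf_spec hvI).1]
      rfl
    have hgetd : first.getD v "" = (pvPf I v).1 := by
      show (first.get? v).getD "" = _
      rw [hget]
      rfl
    rw [hgetd]
    congr 1
    exact ((pv_pf_spec hvI).2.2).symm
  have hB2 : S.foldl (fun nd i => nd.insert (pvPf I i).1 (pvPf I i).2) PySem.Dict.empty
      = PySem.Dict.mk ((PySem.Set.ofList S).map (pvPf I)) := by
    have := pv_fold_insert I hndI S [] hSmem (by simp)
    simpa using this
  have hSnd : S.Nodup := by
    rw [hSdef]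
    exact ((PySem.List.sorted_perm _ _ _).nodup_iff).mpr (by rw [hfk]; exact PySem.Set.nodup_ofList _)
  have hSV : PySem.Set.ofList V = S := by
    rw [hVdef, pv_set_sorted, hSdef, hfk]
  rw [hA1, hA2, hB1, hB2, pv_ofList_of_nodup S hSnd, hSV]

-- ===== VERDICT (by name: the statement is the Claim_ definition above) =====
theorem connect_dicts_spec : Claim_equal_connect_dicts := by
  intro dict1 dict2 _
  unfold Spec_connect_dicts
  simp only [connect_dicts, connect_dicts_alt]
  have hnd : (if (PySem.Dict.ofList dict2).values.sum ≥ (PySem.Dict.ofList dict1).values.sum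
      then (PySem.Dict.ofList dict1).update (PySem.Dict.ofList dict2).items
      else (PySem.Dict.ofList dict2).update (PySem.Dict.ofList dict1).items).keys.Nodup := by
    split_ifs <;> exact PySem.Dict.nodup_keys_update _ _ (PySem.Dict.nodup_keys_ofList _)
  exact pv_main _ _ hnd (pv_d4_items _ hnd)
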